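-- pv_equiv track=rewrite | github.com/RickySalm/ITIS | HW7/hw7.py | number_in_massage
-- ===== SOURCE A (Python) =====
-- def number_in_massage(data):
--     count = 0
--     check_list = '1234567890'
--     for dict_ in data:
--         for number in check_list:
--             if number in dict_['body']:
--                 count += 1
--                 break
--     return count
-- ===== SOURCE B (Python) =====
-- def number_in_massage(data):
--     # A body contains a digit iff deleting all digit characters shortens it.
--     drop = str.maketrans('', '', '1234567890')
--     return sum(len(d['body']) != len(d['body'].translate(drop)) for d in data)
-- ===== Notes on version B (the rewrite author's own statement) =====
-- stated objective: alternative
-- what changed: Replaces A's per-message short-circuiting digit membership scans with a scan-free formulation: delete all digit characters from the body via str.translate and count the bodies whose length changed.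
import Mathlib
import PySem

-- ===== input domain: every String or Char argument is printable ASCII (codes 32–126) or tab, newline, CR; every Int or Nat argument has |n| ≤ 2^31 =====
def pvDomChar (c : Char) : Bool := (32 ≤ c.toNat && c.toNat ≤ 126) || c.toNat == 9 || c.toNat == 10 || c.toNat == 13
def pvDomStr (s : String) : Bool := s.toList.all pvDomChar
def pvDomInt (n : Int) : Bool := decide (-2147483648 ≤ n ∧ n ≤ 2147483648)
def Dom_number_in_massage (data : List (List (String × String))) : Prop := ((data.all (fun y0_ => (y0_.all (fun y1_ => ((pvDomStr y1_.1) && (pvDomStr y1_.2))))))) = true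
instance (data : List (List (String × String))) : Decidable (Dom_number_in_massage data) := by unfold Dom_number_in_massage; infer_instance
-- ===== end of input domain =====

-- B replaces A's per-message digit-membership scans by a scan-free test: delete all digits
-- from the body (str.translate) and count bodies whose length changed (alternative, same result).

-- dict_['body'] on the association list: first match in insertion order, "" only where the key
-- is absent (excluded by Pre_; exact there — Python raises KeyError, both programs alike).
def pvLookup (d : List (String × String)) (k : String) : String :=
  ((d.find? (fun kv => kv.1 == k)).map Prod.snd).getD ""

-- ===== PORT A =====
-- inner loop "for number in check_list: if number in dict_['body']: count += 1; break";
-- true iff the loop hits the break; the chars of check_list = '1234567890' in order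
def pvInnerA (cs : List Char) (body : String) : Bool :=
  match cs with
  | [] => false
  | c :: rest => if PySem.Chars.isIn [c] body.toList then true else pvInnerA rest body

def number_in_massage (data : List (List (String × String))) : Int :=
  data.foldl (fun count dict_ =>
    if pvInnerA ['1','2','3','4','5','6','7','8','9','0'] (pvLookup dict_ "body") then count + 1 else count) 0

-- ===== PORT B =====
-- b.translate(drop): keep exactly the characters not in '1234567890'
def pvTranslateDrop (b : List Char) : List Char :=
  b.filter (fun c => !(['1','2','3','4','5','6','7','8','9','0'] : List Char).contains c)

-- sum(len(d['body']) != len(d['body'].translate(drop)) for d in data)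
def number_in_massage_alt (data : List (List (String × String))) : Int :=
  (data.map (fun d =>
      if (pvLookup d "body").toList.length ≠ (pvTranslateDrop (pvLookup d "body").toList).length
      then (1 : Int) else 0)).sum

-- ===== PRECONDITION & SPEC =====
-- Pre_ excludes exactly the inputs where dict_['body'] raises KeyError (B raises there too).
def Pre_number_in_massage (data : List (List (String × String))) : Prop :=
  (data.all (fun d => d.any (fun kv => kv.1 == "body"))) = true
instance (data : List (List (String × String))) : Decidable (Pre_number_in_massage data) := by unfold Pre_number_in_massage; infer_instance
def pvWitness_number_in_massage : (List (List (String × String))) := [[("body", "a1")], [("body", "no"), ("x", "5")]]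

def Spec_number_in_massage (data : List (List (String × String))) (out : Int) : Prop := out = number_in_massage_alt data
instance (data : List (List (String × String))) (out : Int) : Decidable (Spec_number_in_massage data out) := by unfold Spec_number_in_massage; infer_instance

-- ===== CLAIM (what is proved, stated in full; the proofs are below) =====
def Claim_equal_number_in_massage : Prop := ∀ (data : List (List (String × String))), Dom_number_in_massage data → Pre_number_in_massage data → Spec_number_in_massage data (number_in_massage data)

-- ===== LEMMAS AND PROOFS =====

lemma pvInnerA_eq_any (cs : List Char) (body : String) :
    pvInnerA cs body = cs.any (fun c => PySem.Chars.isIn [c] body.toList) := by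
  induction cs with
  | nil => rfl
  | cons c rest ih =>
    simp only [pvInnerA, List.any_cons]
    split_ifs with h <;> simp [h, ih]

lemma pvInnerA_eq_body_any (cs : List Char) (body : String) :
    pvInnerA cs body = body.toList.any (fun c => cs.contains c) := by
  rw [pvInnerA_eq_any, Bool.eq_iff_iff]
  simp only [List.any_eq_true, PySem.Chars.isIn_iff_infix, List.contains_eq_mem,
    List.singleton_infix_iff, decide_eq_true_eq]
  exact ⟨fun ⟨c, hc, hb⟩ => ⟨c, hb, hc⟩, fun ⟨c, hb, hc⟩ => ⟨c, hc, hb⟩⟩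

-- a list has an element satisfying p iff filtering out the p-elements shortens it
lemma pv_any_iff_filter_len (b : List Char) (p : Char → Bool) :
    b.any p = true ↔ b.length ≠ (b.filter (fun c => !p c)).length := by
  induction b with
  | nil => simp
  | cons c t ih =>
    have hle : (t.filter (fun c => !p c)).length ≤ t.length := List.length_filter_le _ _
    by_cases h : p c = true <;>
      simp [List.filter_cons, h, ih] <;> omega

lemma pv_foldl_acc (l : List (List (String × String))) (a : Int) :
    l.foldl (fun count dict_ =>
        if pvInnerA ['1','2','3','4','5','6','7','8','9','0'] (pvLookup dict_ "body") then count + 1 else count) a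
      = a + (l.map (fun d =>
          if (pvLookup d "body").toList.length ≠ (pvTranslateDrop (pvLookup d "body").toList).length
          then (1 : Int) else 0)).sum := by
  induction l generalizing a with
  | nil => simp
  | cons d t ih =>
    rw [List.foldl_cons, ih]
    simp only [List.map_cons, List.sum_cons, pvInnerA_eq_body_any, pvTranslateDrop]
    by_cases hb : ((pvLookup d "body").toList.any
        (fun c => (['1','2','3','4','5','6','7','8','9','0'] : List Char).contains c)) = true
    · rw [if_pos hb, if_pos ((pv_any_iff_filter_len _ _).mp hb)]; ring
    · rw [if_neg hb, if_neg (fun h => hb ((pv_any_iff_filter_len _ _).mpr h))]; ring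

lemma pv_main (data : List (List (String × String))) :
    number_in_massage data = number_in_massage_alt data := by
  unfold number_in_massage number_in_massage_alt
  rw [pv_foldl_acc]
  ring

-- ===== VERDICT (by name: the statement is the Claim_ definition above) =====
theorem number_in_massage_spec : Claim_equal_number_in_massage := by
  intro data _ _
  exact pv_main data
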